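-- pv_equiv track=rewrite | github.com/blokai/blokai | modules/piece.py | rotations_and_reflections
-- ===== SOURCE A (Python) =====
-- def minima(poly):
--     '''
--        Finds the min x and y coordinate of a polyomino.
--
--        Note that pieces are translated to get minima(poly) == (0, 0)
--        Example:
--            poly = [(0, 1), (1, 0), (1, 1), (1, 2), (2, 1)] # polyomino called X
--            minima(poly) # (0, 0)
--     '''
--     return (min(pt[0] for pt in poly), min(pt[1] for pt in poly))
--
-- def translate_to_origin(poly):
--     '''Translates a polyomino such that minima(poly) == (0, 0).'''
--     (minx, miny) = minima(poly)
--     return [(x - minx, y - miny) for (x, y) in poly]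
--
-- def rotate90(xy):
--     '''Rotates 90 degrees to the right'''
--     x, y = xy
--     return((y, -x))
--
-- def rotate180(xy):
--     '''Rotates 180 degrees'''
--     x, y = xy
--     return((-x, -y))
--
-- def rotate270(xy):
--     '''Rotates 270 degrees to the right'''
--     x, y = xy
--     return((-y,  x))
--
-- def reflect(xy):
--     '''Reflection'''
--     x, y = xy
--     return((-x,  y))
--
-- def rotations_and_reflections(poly):
--     '''All the plane symmetries of a rectangular region.'''
--     symm_polys = [poly,
--                   [rotate90(pt) for pt in poly],
--                   [rotate180(pt) for pt in poly],
--                   [rotate270(pt) for pt in poly],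
--                   [reflect(pt) for pt in poly],
--                   [rotate90(reflect(pt)) for pt in poly],
--                   [rotate180(reflect(pt)) for pt in poly],
--                   [rotate270(reflect(pt)) for pt in poly]]
--     symm_polys = [sorted(translate_to_origin(pl)) for pl in symm_polys]
--     return(symm_polys)
-- ===== SOURCE B (Python) =====
-- def rotations_and_reflections(poly):
--     '''All the plane symmetries of a rectangular region.
--
--     Different algorithm: compute the bounding box (minx, maxx, miny, maxy) in
--     one explicit pass, normalize the piece ONCE to base = poly shifted to the
--     origin, and emit each of the 8 D4 variants directly in already-normalized
--     coordinates via closed forms in the box width/height (so the per-variant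
--     translate_to_origin/min passes of A disappear).'''
--     it = iter(poly)
--     x, y = next(it)
--     minx = maxx = x
--     miny = maxy = y
--     for x, y in it:
--         if x < minx: minx = x
--         if x > maxx: maxx = x
--         if y < miny: miny = y
--         if y > maxy: maxy = y
--     w = maxx - minx
--     h = maxy - miny
--     base = [(x - minx, y - miny) for x, y in poly]
--     forms = [
--         lambda u, v: (u, v),
--         lambda u, v: (v, w - u),
--         lambda u, v: (w - u, h - v),
--         lambda u, v: (h - v, u),
--         lambda u, v: (w - u, v),
--         lambda u, v: (v, u),
--         lambda u, v: (u, h - v),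
--         lambda u, v: (h - v, w - u),
--     ]
--     return [sorted(f(u, v) for u, v in base) for f in forms]
-- ===== Notes on version B (the rewrite author's own statement) =====
-- stated objective: alternative
-- what changed: B computes the bounding box (minx,maxx,miny,maxy) in one explicit pass, normalizes the piece once, and emits each of the 8 symmetry variants directly in already-normalized coordinates via closed-form width/height formulas, eliminating A's per-variant translate_to_origin/min passes.
import Mathlib
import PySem

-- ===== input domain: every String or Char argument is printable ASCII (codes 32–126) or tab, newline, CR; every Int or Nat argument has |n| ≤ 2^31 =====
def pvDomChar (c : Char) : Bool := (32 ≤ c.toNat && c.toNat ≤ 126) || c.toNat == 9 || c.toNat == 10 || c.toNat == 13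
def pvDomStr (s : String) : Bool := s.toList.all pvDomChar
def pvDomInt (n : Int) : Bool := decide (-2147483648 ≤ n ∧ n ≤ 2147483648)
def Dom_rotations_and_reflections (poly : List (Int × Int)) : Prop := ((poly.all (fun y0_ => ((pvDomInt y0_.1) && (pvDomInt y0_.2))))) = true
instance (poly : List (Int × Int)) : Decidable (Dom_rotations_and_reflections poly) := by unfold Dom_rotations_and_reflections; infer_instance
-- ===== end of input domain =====

-- B computes the bounding box in one pass, normalizes the piece once, and emits each of
-- the 8 symmetry variants by closed-form box formulas (no per-variant translate/min pass);
-- objective: alternative algorithm, same asymptotic cost.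


-- ===== PORT A =====
-- minima: Python's min(...) raises ValueError on an empty generator; Pre_ excludes poly = [],
-- so the .getD 0 default is never reached on admitted inputs.
def pvMinima (poly : List (Int × Int)) : Int × Int :=
  ((PySem.List.min? (poly.map (fun pt => pt.1)) (fun x => x)).getD 0,
   (PySem.List.min? (poly.map (fun pt => pt.2)) (fun x => x)).getD 0)

def pvTranslateToOrigin (poly : List (Int × Int)) : List (Int × Int) :=
  let m := pvMinima poly
  poly.map (fun xy => (xy.1 - m.1, xy.2 - m.2))

def pvRotate90 (xy : Int × Int) : Int × Int := (xy.2, -xy.1)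
def pvRotate180 (xy : Int × Int) : Int × Int := (-xy.1, -xy.2)
def pvRotate270 (xy : Int × Int) : Int × Int := (-xy.2, xy.1)
def pvReflect (xy : Int × Int) : Int × Int := (-xy.1, xy.2)

def rotations_and_reflections (poly : List (Int × Int)) : List (List (Int × Int)) :=
  let symm_polys : List (List (Int × Int)) :=
    [poly,
     poly.map (fun pt => pvRotate90 pt),
     poly.map (fun pt => pvRotate180 pt),
     poly.map (fun pt => pvRotate270 pt),
     poly.map (fun pt => pvReflect pt),
     poly.map (fun pt => pvRotate90 (pvReflect pt)),
     poly.map (fun pt => pvRotate180 (pvReflect pt)),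
     poly.map (fun pt => pvRotate270 (pvReflect pt))]
  symm_polys.map (fun pl => PySem.List.sorted2 (pvTranslateToOrigin pl) Prod.fst Prod.snd false)

-- ===== PORT B =====
-- the bounding-box accumulator step ('if x < minx: minx = x' … chain of the Python loop)
def pvBoxStep (acc : Int × Int × Int × Int) (p : Int × Int) : Int × Int × Int × Int :=
  (if p.1 < acc.1 then p.1 else acc.1,
   if p.1 > acc.2.1 then p.1 else acc.2.1,
   if p.2 < acc.2.2.1 then p.2 else acc.2.2.1,
   if p.2 > acc.2.2.2 then p.2 else acc.2.2.2)

-- B: 'x, y = next(it)' raises StopIteration on []; that input is outside Pre_, [] returned.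
def rotations_and_reflections_alt (poly : List (Int × Int)) : List (List (Int × Int)) :=
  match poly with
  | [] => []
  | (x0, y0) :: rest =>
    let b := rest.foldl pvBoxStep (x0, x0, y0, y0)
    let w := b.2.1 - b.1
    let h := b.2.2.2 - b.2.2.1
    let base := poly.map (fun p => (p.1 - b.1, p.2 - b.2.2.1))
    ([(fun u v => (u, v)),
      (fun u v => (v, w - u)),
      (fun u v => (w - u, h - v)),
      (fun u v => (h - v, u)),
      (fun u v => (w - u, v)),
      (fun u v => (v, u)),
      (fun u v => (u, h - v)),
      (fun u v => (h - v, w - u))] : List (Int → Int → Int × Int)).map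
      (fun f => PySem.List.sorted2 (base.map (fun p => f p.1 p.2)) Prod.fst Prod.snd false)

-- ===== PRECONDITION & SPEC =====
-- Pre_ excludes only the empty list, on which Python's min()/next() raise.
def Pre_rotations_and_reflections (poly : List (Int × Int)) : Prop := poly ≠ []
instance (poly : List (Int × Int)) : Decidable (Pre_rotations_and_reflections poly) := by unfold Pre_rotations_and_reflections; infer_instance
def pvWitness_rotations_and_reflections : (List (Int × Int)) := [(0, 1), (1, 0), (1, 1)]

def Spec_rotations_and_reflections (poly : List (Int × Int)) (out : List (List (Int × Int))) : Prop := out = rotations_and_reflections_alt poly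
instance (poly : List (Int × Int)) (out : List (List (Int × Int))) : Decidable (Spec_rotations_and_reflections poly out) := by unfold Spec_rotations_and_reflections; infer_instance

-- ===== CLAIM (what is proved, stated in full; the proofs are below) =====
def Claim_equal_rotations_and_reflections : Prop := ∀ (poly : List (Int × Int)), Dom_rotations_and_reflections poly → Pre_rotations_and_reflections poly → Spec_rotations_and_reflections poly (rotations_and_reflections poly)

-- ===== LEMMAS AND PROOFS =====

-- the bounding-box fold computes the four running extrema componentwise
theorem pvBoxStep_fold (l : List (Int × Int)) (a b c d : Int) :
    l.foldl pvBoxStep (a, b, c, d) =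
      ((l.map (fun p => p.1)).foldl min a, (l.map (fun p => p.1)).foldl max b,
       (l.map (fun p => p.2)).foldl min c, (l.map (fun p => p.2)).foldl max d) := by
  induction l generalizing a b c d with
  | nil => simp
  | cons p t ih =>
    have h1 : (if p.1 < a then p.1 else a) = min a p.1 := by split_ifs <;> omega
    have h2 : (if p.1 > b then p.1 else b) = max b p.1 := by split_ifs <;> omega
    have h3 : (if p.2 < c then p.2 else c) = min c p.2 := by split_ifs <;> omega
    have h4 : (if p.2 > d then p.2 else d) = max d p.2 := by split_ifs <;> omega
    simp only [List.foldl_cons, List.map_cons, pvBoxStep, ih, h1, h2, h3, h4]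

-- running min of the negations = negated running max
theorem foldl_min_neg (l : List Int) (a : Int) :
    (l.map (fun x => -x)).foldl min (-a) = -(l.foldl max a) := by
  induction l generalizing a with
  | nil => simp
  | cons x t ih =>
    have h : min (-a) (-x) = -(max a x) := by omega
    simpa [h] using ih (max a x)

-- neg-component running minima, in the exact shapes the main goal produces
theorem min_neg_fst (rest : List (Int × Int)) (a : Int) :
    List.foldl min (-a) (rest.map (fun pt => -pt.1)) =
      -(List.foldl max a (rest.map (fun pt => pt.1))) := by
  have := foldl_min_neg (rest.map (fun pt => pt.1)) a
  simpa [List.map_map, Function.comp_def] using this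

theorem min_neg_snd (rest : List (Int × Int)) (a : Int) :
    List.foldl min (-a) (rest.map (fun pt => -pt.2)) =
      -(List.foldl max a (rest.map (fun pt => pt.2))) := by
  have := foldl_min_neg (rest.map (fun pt => pt.2)) a
  simpa [List.map_map, Function.comp_def] using this

theorem rotations_and_reflections_eq (x0 y0 : Int) (rest : List (Int × Int)) :
    rotations_and_reflections ((x0, y0) :: rest) =
      rotations_and_reflections_alt ((x0, y0) :: rest) := by
  simp only [rotations_and_reflections, rotations_and_reflections_alt,
    pvTranslateToOrigin, pvMinima, pvRotate90, pvRotate180, pvRotate270, pvReflect,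
    List.map_map, List.map_cons, List.map_nil, pvBoxStep_fold,
    Function.comp_def, PySem.List.min?_id_cons, Option.getD_some, neg_neg,
    min_neg_fst, min_neg_snd]
  simp only [List.cons.injEq, and_true]
  and_intros <;> congr 1 <;>
    simp only [List.cons.injEq, Prod.mk.injEq, List.map_inj_left, Prod.forall] <;>
    and_intros <;> (intros; first | ring | simp)
  all_goals simp

-- ===== VERDICT (by name: the statement is the Claim_ definition above) =====
theorem rotations_and_reflections_spec : Claim_equal_rotations_and_reflections := by
  intro poly _ hpre
  show rotations_and_reflections poly = rotations_and_reflections_alt poly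
  match poly with
  | [] => exact absurd rfl hpre
  | (x0, y0) :: rest => exact rotations_and_reflections_eq x0 y0 rest
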